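-- pv_equiv track=rewrite | github.com/mazzal1/advent-of-code-2023 | day2b/main.py | compute_fewest_cubes
-- ===== SOURCE A (Python) =====
-- def compute_fewest_cubes(game_extractions: list[dict[str, int]]) -> dict[str, int]:
--     fewest_cubes = {
--         "red": 0,
--         "green": 0,
--         "blue": 0
--     }
--     for extraction in game_extractions:
--         if "red" in extraction and extraction["red"] > fewest_cubes["red"]:
--             fewest_cubes["red"] = extraction["red"]
--         if "green" in extraction and extraction["green"] > fewest_cubes["green"]:
--             fewest_cubes["green"] = extraction["green"]
--         if "blue" in extraction and extraction["blue"] > fewest_cubes["blue"]: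
--             fewest_cubes["blue"] = extraction["blue"]
--     return fewest_cubes
-- ===== SOURCE B (Python) =====
-- def compute_fewest_cubes(game_extractions: list[dict[str, int]]) -> dict[str, int]:
--     pairs = [("red", 0), ("green", 0), ("blue", 0)]
--     for extraction in game_extractions:
--         pairs.extend(extraction.items())
--     pairs = sorted(pairs, key=lambda p: p[1], reverse=True)
--     return {color: next(v for k, v in pairs if k == color)
--             for color in ("red", "green", "blue")}
-- ===== Notes on version B (the rewrite author's own statement) =====
-- stated objective: alternative
-- what changed: B flattens all extractions plus three (color, 0) sentinels into one pair list, sorts it by count descending, and reads each color's answer off as the first pair with that key (sort-then-first-match) instead of A's single pass with three running-max accumulators; Pre_ only excludes association lists that give one extraction duplicate keys, a representation no Python dict can have.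
import Mathlib
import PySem

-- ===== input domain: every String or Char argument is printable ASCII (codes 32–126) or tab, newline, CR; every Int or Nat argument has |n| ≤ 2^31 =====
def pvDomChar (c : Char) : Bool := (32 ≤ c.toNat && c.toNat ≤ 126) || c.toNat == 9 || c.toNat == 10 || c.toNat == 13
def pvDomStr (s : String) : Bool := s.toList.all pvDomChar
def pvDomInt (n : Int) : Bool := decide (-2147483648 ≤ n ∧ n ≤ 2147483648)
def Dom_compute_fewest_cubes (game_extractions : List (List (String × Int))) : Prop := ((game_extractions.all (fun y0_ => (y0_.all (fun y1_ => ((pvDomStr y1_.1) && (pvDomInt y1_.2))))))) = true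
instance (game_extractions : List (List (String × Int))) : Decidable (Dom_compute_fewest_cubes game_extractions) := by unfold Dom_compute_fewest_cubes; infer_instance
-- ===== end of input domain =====

-- B replaces A's single pass with three running-max accumulators by a different algorithm:
-- flatten all extractions plus three (color, 0) sentinels into one pair list, sort it by
-- count descending, and read each color's answer off as the first pair with that key.

-- ===== PORT A =====
-- one conditional update of A's loop body:
-- 'if "c" in extraction and extraction["c"] > fewest_cubes["c"]: fewest_cubes["c"] = extraction["c"]'
-- (the membership test + lookup is ported as a match on the dict lookup, some v iff the key is present)
def pvUpd (fc : PySem.Dict String Int) (ed : PySem.Dict String Int) (c : String) :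
    PySem.Dict String Int :=
  match ed.get? c with
  | some v => if v > fc.getD c 0 then fc.insert c v else fc
  | none => fc

-- A's loop body: the three updates, in A's order
def pvStepA (fc : PySem.Dict String Int) (e : List (String × Int)) : PySem.Dict String Int :=
  let ed := PySem.Dict.mk e
  pvUpd (pvUpd (pvUpd fc ed "red") ed "green") ed "blue"

def compute_fewest_cubes (game_extractions : List (List (String × Int))) : List (String × Int) :=
  (game_extractions.foldl pvStepA
    (PySem.Dict.mk [("red", 0), ("green", 0), ("blue", 0)])).items

-- ===== PORT B =====
-- pairs = sentinels; for extraction: pairs.extend(extraction.items())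
-- pairs = sorted(pairs, key=lambda p: p[1], reverse=True)
-- {color: next(v for k, v in pairs if k == color) for color in ("red","green","blue")}
-- (next always succeeds because the (color, 0) sentinel is in pairs; the none branch is unreachable)
def compute_fewest_cubes_alt (game_extractions : List (List (String × Int))) : List (String × Int) :=
  let pairs := game_extractions.foldl (fun acc e => acc ++ (PySem.Dict.mk e).items)
      [("red", (0 : Int)), ("green", 0), ("blue", 0)]
  let sp := PySem.List.sorted pairs (fun p => p.2) true
  ["red", "green", "blue"].map (fun c =>
    (c, match sp.find? (fun p => p.1 == c) with
        | some p => p.2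
        | none => 0))

-- ===== PRECONDITION & SPEC =====
-- Pre_ excludes only inputs whose association-list encoding gives one extraction duplicate
-- keys: no Python dict can have duplicate keys, so no actual input of A is excluded; on such
-- lists A's first-match lookup and B's flatten-and-sort see different multisets of values.
def Pre_compute_fewest_cubes (game_extractions : List (List (String × Int))) : Prop :=
  ∀ e ∈ game_extractions, (e.map Prod.fst).Nodup
instance (game_extractions : List (List (String × Int))) : Decidable (Pre_compute_fewest_cubes game_extractions) := by unfold Pre_compute_fewest_cubes; infer_instance
def pvWitness_compute_fewest_cubes : (List (List (String × Int))) :=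
  [[("red", 3), ("blue", 1)], [("green", 2)]]
def Spec_compute_fewest_cubes (game_extractions : List (List (String × Int))) (out : List (String × Int)) : Prop := out = compute_fewest_cubes_alt game_extractions
instance (game_extractions : List (List (String × Int))) (out : List (String × Int)) : Decidable (Spec_compute_fewest_cubes game_extractions out) := by unfold Spec_compute_fewest_cubes; infer_instance

-- ===== CLAIM (what is proved, stated in full; the proofs are below) =====
def Claim_equal_compute_fewest_cubes : Prop := ∀ (game_extractions : List (List (String × Int))), Dom_compute_fewest_cubes game_extractions → Pre_compute_fewest_cubes game_extractions → Spec_compute_fewest_cubes game_extractions (compute_fewest_cubes game_extractions)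

-- ===== LEMMAS AND PROOFS =====

-- the per-color accumulator step of A
def pvStepC (c : String) (acc : Int) (e : List (String × Int)) : Int :=
  match PySem.Dict.get? (PySem.Dict.mk e) c with
  | some v => if v > acc then v else acc
  | none => acc

lemma getD_red (r g b : Int) : PySem.Dict.getD (PySem.Dict.mk [("red",r),("green",g),("blue",b)]) "red" 0 = r := rfl
lemma getD_green (r g b : Int) : PySem.Dict.getD (PySem.Dict.mk [("red",r),("green",g),("blue",b)]) "green" 0 = g := rfl
lemma getD_blue (r g b : Int) : PySem.Dict.getD (PySem.Dict.mk [("red",r),("green",g),("blue",b)]) "blue" 0 = b := rfl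
lemma ins_red (r g b v : Int) : (PySem.Dict.mk [("red",r),("green",g),("blue",b)]).insert "red" v = PySem.Dict.mk [("red",v),("green",g),("blue",b)] := rfl
lemma ins_green (r g b v : Int) : (PySem.Dict.mk [("red",r),("green",g),("blue",b)]).insert "green" v = PySem.Dict.mk [("red",r),("green",v),("blue",b)] := rfl
lemma ins_blue (r g b v : Int) : (PySem.Dict.mk [("red",r),("green",g),("blue",b)]).insert "blue" v = PySem.Dict.mk [("red",r),("green",g),("blue",v)] := rfl

lemma pvUpd_red (r g b : Int) (ed : PySem.Dict String Int) :
    pvUpd (PySem.Dict.mk [("red",r),("green",g),("blue",b)]) ed "red"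
      = PySem.Dict.mk [("red", match ed.get? "red" with
          | some v => if v > r then v else r | none => r), ("green",g), ("blue",b)] := by
  unfold pvUpd
  cases ed.get? "red" with
  | none => rfl
  | some v => rw [getD_red]; dsimp only; split_ifs <;> simp [ins_red]

lemma pvUpd_green (r g b : Int) (ed : PySem.Dict String Int) :
    pvUpd (PySem.Dict.mk [("red",r),("green",g),("blue",b)]) ed "green"
      = PySem.Dict.mk [("red",r), ("green", match ed.get? "green" with
          | some v => if v > g then v else g | none => g), ("blue",b)] := by
  unfold pvUpd
  cases ed.get? "green" with
  | none => rfl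
  | some v => rw [getD_green]; dsimp only; split_ifs <;> simp [ins_green]

lemma pvUpd_blue (r g b : Int) (ed : PySem.Dict String Int) :
    pvUpd (PySem.Dict.mk [("red",r),("green",g),("blue",b)]) ed "blue"
      = PySem.Dict.mk [("red",r), ("green",g), ("blue", match ed.get? "blue" with
          | some v => if v > b then v else b | none => b)] := by
  unfold pvUpd
  cases ed.get? "blue" with
  | none => rfl
  | some v => rw [getD_blue]; dsimp only; split_ifs <;> simp [ins_blue]

lemma pvStepA_eq (r g b : Int) (e : List (String × Int)) :
    pvStepA (PySem.Dict.mk [("red", r), ("green", g), ("blue", b)]) e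
      = PySem.Dict.mk [("red", pvStepC "red" r e), ("green", pvStepC "green" g e),
          ("blue", pvStepC "blue" b e)] := by
  simp only [pvStepA, pvUpd_red, pvUpd_green, pvUpd_blue, pvStepC]

lemma pvLoop_eq (gs : List (List (String × Int))) (r g b : Int) :
    gs.foldl pvStepA (PySem.Dict.mk [("red", r), ("green", g), ("blue", b)])
      = PySem.Dict.mk [("red", gs.foldl (pvStepC "red") r),
          ("green", gs.foldl (pvStepC "green") g), ("blue", gs.foldl (pvStepC "blue") b)] := by
  induction gs generalizing r g b with
  | nil => rfl
  | cons e t ih => simp only [List.foldl_cons, pvStepA_eq, ih]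

lemma pvStepC_eq_max (c : String) (acc : Int) (e : List (String × Int)) :
    pvStepC c acc e = match PySem.Dict.get? (PySem.Dict.mk e) c with
      | some v => max acc v
      | none => acc := by
  unfold pvStepC
  cases PySem.Dict.get? (PySem.Dict.mk e) c with
  | none => rfl
  | some v =>
      simp only
      split_ifs with h
      · exact (max_eq_right h.le).symm
      · exact (max_eq_left (not_lt.mp h)).symm

lemma pvFoldC_eq (c : String) (gs : List (List (String × Int))) (a : Int) :
    gs.foldl (pvStepC c) a
      = (gs.filterMap (fun e => PySem.Dict.get? (PySem.Dict.mk e) c)).foldl max a := by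
  induction gs generalizing a with
  | nil => rfl
  | cons e t ih =>
      rw [List.foldl_cons, pvStepC_eq_max]
      cases h : PySem.Dict.get? (PySem.Dict.mk e) c <;>
        simp [h, ih]

-- items of a literal dict is the pair list itself
lemma pvItems_mk (e : List (String × Int)) : (PySem.Dict.mk e).items = e := rfl

-- in a list sorted descending by .2, the first pair satisfying f bounds every pair satisfying f
lemma pvFind_first_max (l : List (String × Int)) (f : String × Int → Bool)
    (hp : l.Pairwise (fun a b => b.2 ≤ a.2)) (q : String × Int)
    (hq : l.find? f = some q) : ∀ p ∈ l, f p = true → p.2 ≤ q.2 := by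
  induction l with
  | nil => simp at hq
  | cons a t ih =>
      intro p hpmem hpf
      by_cases ha : f a = true
      · simp only [List.find?_cons, ha] at hq
        rcases List.mem_cons.mp hpmem with h | h
        · rw [Option.some_inj] at hq; rw [h, hq]
        · rw [Option.some_inj] at hq
          exact hq ▸ (List.pairwise_cons.mp hp).1 p h
      · rw [Bool.not_eq_true] at ha
        simp only [List.find?_cons, ha] at hq
        rcases List.mem_cons.mp hpmem with h | h
        · simp [h, ha] at hpf
        · exact ih (List.pairwise_cons.mp hp).2 hq p h hpf

-- the value A computes for color c, characterised on the flat pair list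
def pvM (c : String) (gs : List (List (String × Int))) : Int := gs.foldl (pvStepC c) 0

lemma pvM_upper (c : String) (gs : List (List (String × Int)))
    (hnd : ∀ e ∈ gs, (e.map Prod.fst).Nodup) :
    ∀ e ∈ gs, ∀ p ∈ e, p.1 = c → p.2 ≤ pvM c gs := by
  intro e he p hpe hpc
  have hget : (PySem.Dict.mk e).get? c = some p.2 := by
    have := PySem.Dict.get?_of_mem_items (d := PySem.Dict.mk e) (k := c) (v := p.2)
    apply this
    · rw [pvItems_mk]; exact hpc ▸ hpe
    · have : (PySem.Dict.mk e).keys = e.map Prod.fst := rfl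
      rw [this]; exact hnd e he
  have hmem : p.2 ∈ gs.filterMap (fun e => PySem.Dict.get? (PySem.Dict.mk e) c) :=
    List.mem_filterMap.mpr ⟨e, he, hget⟩
  rw [pvM, pvFoldC_eq]
  exact (PySem.List.le_foldl_max _ _).2 _ hmem

lemma pvM_nonneg (c : String) (gs : List (List (String × Int))) : 0 ≤ pvM c gs := by
  rw [pvM, pvFoldC_eq]
  exact (PySem.List.le_foldl_max _ _).1

lemma pvGet_mem (c : String) (e : List (String × Int)) (v : Int)
    (h : (PySem.Dict.mk e).get? c = some v) : ∃ p ∈ e, p.1 = c ∧ p.2 = v := by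
  have h2 : (e.find? (fun p => p.1 == c)).map Prod.snd = some v := h
  rcases Option.map_eq_some_iff.mp h2 with ⟨p, hp, hv⟩
  exact ⟨p, List.mem_of_find?_eq_some hp, by simpa using List.find?_some hp, hv⟩

lemma pvM_attained (c : String) (gs : List (List (String × Int))) :
    pvM c gs = 0 ∨ ∃ e ∈ gs, ∃ p ∈ e, p.1 = c ∧ p.2 = pvM c gs := by
  rw [pvM, pvFoldC_eq]
  rcases PySem.List.foldl_max_mem (gs.filterMap (fun e => PySem.Dict.get? (PySem.Dict.mk e) c)) 0 with h | h
  · exact Or.inl h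
  · right
    rcases List.mem_filterMap.mp h with ⟨e, he, hget⟩
    exact ⟨e, he, pvGet_mem c e _ hget⟩

-- per-color agreement: the first pair with key c in the descending-sorted flat list carries pvM c gs
lemma pvColor_eq (gs : List (List (String × Int))) (c : String)
    (hnd : ∀ e ∈ gs, (e.map Prod.fst).Nodup)
    (hc : (c, (0 : Int)) ∈ ([("red", (0:Int)), ("green", 0), ("blue", 0)] : List (String × Int)))
    (hsentc : ∀ p ∈ ([("red", (0:Int)), ("green", 0), ("blue", 0)] : List (String × Int)), p.1 = c → p.2 = 0) :
    (match (PySem.List.sorted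
        ([("red", (0:Int)), ("green", 0), ("blue", 0)] ++ gs.flatMap (fun e => (PySem.Dict.mk e).items))
        (fun p => p.2) true).find? (fun p => p.1 == c) with
      | some p => p.2
      | none => 0) = pvM c gs := by
  set sent : List (String × Int) := [("red", (0:Int)), ("green", 0), ("blue", 0)] with hsent
  set L : List (String × Int) := sent ++ gs.flatMap (fun e => (PySem.Dict.mk e).items) with hL
  set S := PySem.List.sorted L (fun p => p.2) true with hS
  -- membership in L ↔ in sent or in some extraction
  have hmemL : ∀ p, p ∈ L ↔ p ∈ sent ∨ ∃ e ∈ gs, p ∈ e := by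
    intro p
    simp only [hL, List.mem_append, List.mem_flatMap]
  -- the sentinel is in S, so find? succeeds
  have hcS : (c, (0 : Int)) ∈ S := by
    rw [hS, PySem.List.mem_sorted]
    exact (hmemL _).mpr (Or.inl hc)
  have hfind : (S.find? (fun p => p.1 == c)).isSome := by
    rw [List.find?_isSome]
    exact ⟨(c, 0), hcS, by simp⟩
  rcases Option.isSome_iff_exists.mp hfind with ⟨q, hq⟩
  rw [hq]
  have hqS : q ∈ S := List.mem_of_find?_eq_some hq
  have hqc : q.1 = c := by simpa using List.find?_some hq
  have hperm : S.Perm L := PySem.List.sorted_perm ..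
  have hpw : S.Pairwise (fun a b => b.2 ≤ a.2) := PySem.List.sorted_pairwise_rev ..
  -- every pair of L with key c is ≤ pvM c gs
  have hub : ∀ p ∈ L, p.1 = c → p.2 ≤ pvM c gs := by
    intro p hp hpc
    rcases (hmemL p).mp hp with h | ⟨e, he, hpe⟩
    · rw [hsentc p h hpc]; exact pvM_nonneg c gs
    · exact pvM_upper c gs hnd e he p hpe hpc
  -- q.2 ≤ pvM
  have h1 : q.2 ≤ pvM c gs := hub q (hperm.mem_iff.mp hqS) hqc
  -- pvM ≤ q.2: some pair of L with key c carries pvM, and q is maximal among those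
  have h2 : pvM c gs ≤ q.2 := by
    have hmax := pvFind_first_max S (fun p => p.1 == c) hpw q hq
    rcases pvM_attained c gs with h0 | ⟨e, he, p, hpe, hpc, hpv⟩
    · calc pvM c gs = (c, (0:Int)).2 := by rw [h0]
        _ ≤ q.2 := hmax _ hcS (by simp)
    · calc pvM c gs = p.2 := hpv.symm
        _ ≤ q.2 := hmax p (hperm.mem_iff.mpr ((hmemL p).mpr (Or.inr ⟨e, he, hpe⟩)))
              (by simp [hpc])
  show q.2 = pvM c gs
  exact le_antisymm h1 h2

-- ===== VERDICT (by name: the statement is the Claim_ definition above) =====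
theorem compute_fewest_cubes_spec : Claim_equal_compute_fewest_cubes := by
  intro gs _ hnd
  unfold Spec_compute_fewest_cubes compute_fewest_cubes compute_fewest_cubes_alt
  rw [pvLoop_eq, PySem.List.foldl_append_eq_flatMap]
  simp only [List.map_cons, List.map_nil]
  have hr := pvColor_eq gs "red" hnd (by simp) (by decide)
  have hg := pvColor_eq gs "green" hnd (by simp) (by decide)
  have hb := pvColor_eq gs "blue" hnd (by simp) (by decide)
  rw [hr, hg, hb]
  rfl
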